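-- pv_equiv track=rewrite | github.com/saicgr/AIFitnessCoach | backend/services/langgraph_agents/onboarding/nodes/extraction.py | _extract_selected_days
-- ===== SOURCE A (Python) =====
-- def _extract_selected_days(user_message: str) -> list:
--     """Extract selected workout days from user message."""
--     day_name_to_index = {
--         'monday': 0, 'tuesday': 1, 'wednesday': 2, 'thursday': 3,
--         'friday': 4, 'saturday': 5, 'sunday': 6,
--         'mon': 0, 'tue': 1, 'wed': 2, 'thu': 3, 'fri': 4, 'sat': 5, 'sun': 6
--     }
--     user_lower = user_message.strip().lower()
--
--     selected_indices = []
--     for day_name, idx in day_name_to_index.items():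
--         if day_name in user_lower:
--             if idx not in selected_indices:
--                 selected_indices.append(idx)
--
--     if selected_indices:
--         selected_indices.sort()
--         return selected_indices
--     return None
-- ===== SOURCE B (Python) =====
-- DAY_SYNONYMS = [
--     ['monday', 'mon'], ['tuesday', 'tue'], ['wednesday', 'wed'],
--     ['thursday', 'thu'], ['friday', 'fri'], ['saturday', 'sat'],
--     ['sunday', 'sun'],
-- ]
--
--
-- def _extract_selected_days(user_message: str) -> list:
--     """Extract selected workout days from user message."""
--     user_lower = user_message.strip().lower()
--     result = [i for i, names in enumerate(DAY_SYNONYMS)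
--               if any(n in user_lower for n in names)]
--     return result or None
-- ===== Notes on version B (the rewrite author's own statement) =====
-- stated objective: simpler
-- what changed: Replaces the name-to-index dict scan with dedup list and final sort by an index-ordered synonym table iterated 0..6 once, so no dedup membership test and no sort are needed.
import Mathlib
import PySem

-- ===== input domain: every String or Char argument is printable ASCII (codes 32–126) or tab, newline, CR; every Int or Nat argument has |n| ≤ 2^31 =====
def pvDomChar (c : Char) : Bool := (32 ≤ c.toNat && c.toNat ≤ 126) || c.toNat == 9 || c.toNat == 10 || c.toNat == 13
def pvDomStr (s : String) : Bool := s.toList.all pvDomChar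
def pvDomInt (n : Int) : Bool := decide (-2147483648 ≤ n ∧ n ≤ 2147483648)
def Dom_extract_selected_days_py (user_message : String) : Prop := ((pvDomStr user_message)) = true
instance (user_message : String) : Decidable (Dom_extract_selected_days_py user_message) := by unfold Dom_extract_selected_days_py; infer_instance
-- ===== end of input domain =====

-- B replaces A's 14-entry dict scan with dedup membership test and final sort by one pass over an
-- index-ordered synonym table (indices 0..6 in order), which needs no dedup and no sort; objective: simpler.


-- ===== PORT A =====
-- the dict literal day_name_to_index as its items() list (insertion order; all 14 keys distinct)
def pvDayPairs : List (String × Int) :=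
  [("monday", 0), ("tuesday", 1), ("wednesday", 2), ("thursday", 3),
   ("friday", 4), ("saturday", 5), ("sunday", 6),
   ("mon", 0), ("tue", 1), ("wed", 2), ("thu", 3), ("fri", 4), ("sat", 5), ("sun", 6)]

def extract_selected_days_py (user_message : String) : Option (List Int) :=
  let user_lower := PySem.Str.lower (PySem.Str.strip user_message)
  let selected_indices :=
    pvDayPairs.foldl
      (fun acc p =>
        if PySem.Str.isIn p.1 user_lower then
          if acc.contains p.2 then acc else acc ++ [p.2]
        else acc) []
  if selected_indices ≠ [] then
    some (PySem.List.sorted selected_indices (fun x => x) false)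
  else none

-- ===== PORT B =====
-- DAY_SYNONYMS in Source B: index-ordered synonym table
def pvDaySynonyms : List (List String) :=
  [["monday", "mon"], ["tuesday", "tue"], ["wednesday", "wed"],
   ["thursday", "thu"], ["friday", "fri"], ["saturday", "sat"], ["sunday", "sun"]]

def extract_selected_days_py_alt (user_message : String) : Option (List Int) :=
  let user_lower := PySem.Str.lower (PySem.Str.strip user_message)
  let result :=
    (PySem.List.enumerate pvDaySynonyms).foldl
      (fun acc p =>
        if p.2.any (fun n => PySem.Str.isIn n user_lower) then acc ++ [p.1] else acc) []
  if result ≠ [] then some result else none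

-- ===== PRECONDITION & SPEC =====
def Spec_extract_selected_days_py (user_message : String) (out : Option (List Int)) : Prop := out = extract_selected_days_py_alt user_message
instance (user_message : String) (out : Option (List Int)) : Decidable (Spec_extract_selected_days_py user_message out) := by unfold Spec_extract_selected_days_py; infer_instance

-- ===== CLAIM (what is proved, stated in full; the proofs are below) =====
def Claim_equal_extract_selected_days_py : Prop := ∀ (user_message : String), Dom_extract_selected_days_py user_message → Spec_extract_selected_days_py user_message (extract_selected_days_py user_message)

-- ===== LEMMAS AND PROOFS =====

-- membership in A's accumulator after the dict loop
theorem pv_foldA_mem (u : String) (ps : List (String × Int)) (acc : List Int) (x : Int) :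
    (x ∈ ps.foldl
      (fun acc p =>
        if PySem.Str.isIn p.1 u then
          if acc.contains p.2 then acc else acc ++ [p.2]
        else acc) acc) ↔
    x ∈ acc ∨ ∃ p ∈ ps, PySem.Str.isIn p.1 u = true ∧ p.2 = x := by
  induction ps generalizing acc with
  | nil => simp
  | cons p t ih =>
    simp only [List.foldl_cons]
    rw [ih]
    simp only [List.mem_cons, List.contains_iff_mem]
    constructor
    · rintro (hx | ⟨p', hp', hc, rfl⟩)
      · split_ifs at hx with h1 h2
        · exact Or.inl hx
        · rcases List.mem_append.mp hx with hx | hx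
          · exact Or.inl hx
          · exact Or.inr ⟨p, Or.inl rfl, h1, (List.mem_singleton.mp hx).symm⟩
        · exact Or.inl hx
      · exact Or.inr ⟨p', Or.inr hp', hc, rfl⟩
    · rintro (hx | ⟨p', hp' | hp', hc, rfl⟩)
      · split_ifs with h1 h2
        · exact Or.inl hx
        · exact Or.inl (List.mem_append.mpr (Or.inl hx))
        · exact Or.inl hx
      · subst hp'
        rw [if_pos hc]
        split_ifs with h2
        · exact Or.inl h2
        · exact Or.inl (List.mem_append.mpr (Or.inr (List.mem_singleton.mpr rfl)))
      · exact Or.inr ⟨p', hp', hc, rfl⟩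

-- A's accumulator stays duplicate-free
theorem pv_foldA_nodup (u : String) (ps : List (String × Int)) (acc : List Int)
    (h : acc.Nodup) :
    (ps.foldl
      (fun acc p =>
        if PySem.Str.isIn p.1 u then
          if acc.contains p.2 then acc else acc ++ [p.2]
        else acc) acc).Nodup := by
  induction ps generalizing acc with
  | nil => exact h
  | cons p t ih =>
    simp only [List.foldl_cons]
    split_ifs with h1 h2
    · exact ih _ h
    · refine ih _ ?_
      rw [List.contains_iff_mem] at h2
      refine (List.nodup_append).mpr ⟨h, List.nodup_singleton _, ?_⟩
      intro a ha b hb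
      rw [List.mem_singleton] at hb
      subst hb
      exact fun he => h2 (he ▸ ha)
    · exact ih _ h

-- the day index x is collected by A's dict loop iff B's synonym table selects it
set_option maxHeartbeats 1000000 in
theorem pv_mem_iff (u : String) (x : Int) :
    (∃ p ∈ pvDayPairs, PySem.Str.isIn p.1 u = true ∧ p.2 = x) ↔
    (x ∈ ((PySem.List.enumerate pvDaySynonyms).filter
        (fun p : Int × List String => p.2.any (fun n => PySem.Str.isIn n u))).map
        (fun p => p.1)) := by
  rw [List.mem_map]
  simp only [List.mem_filter, pvDayPairs, pvDaySynonyms, PySem.List.enumerate_cons,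
    PySem.List.enumerate_nil, List.mem_cons, List.not_mem_nil, or_false, and_assoc,
    exists_eq_or_imp, exists_eq_left, List.any_cons, List.any_nil, Bool.or_false,
    Bool.or_eq_true]
  norm_num
  constructor
  · rintro (⟨h,rfl⟩|⟨h,rfl⟩|⟨h,rfl⟩|⟨h,rfl⟩|⟨h,rfl⟩|⟨h,rfl⟩|⟨h,rfl⟩|⟨h,rfl⟩|⟨h,rfl⟩|⟨h,rfl⟩|⟨h,rfl⟩|⟨h,rfl⟩|⟨h,rfl⟩|⟨h,rfl⟩)
    · exact Or.inl ⟨Or.inl h, rfl⟩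
    · exact Or.inr (Or.inl ⟨Or.inl h, rfl⟩)
    · exact Or.inr (Or.inr (Or.inl ⟨Or.inl h, rfl⟩))
    · exact Or.inr (Or.inr (Or.inr (Or.inl ⟨Or.inl h, rfl⟩)))
    · exact Or.inr (Or.inr (Or.inr (Or.inr (Or.inl ⟨Or.inl h, rfl⟩))))
    · exact Or.inr (Or.inr (Or.inr (Or.inr (Or.inr (Or.inl ⟨Or.inl h, rfl⟩)))))
    · exact Or.inr (Or.inr (Or.inr (Or.inr (Or.inr (Or.inr ⟨Or.inl h, rfl⟩)))))
    · exact Or.inl ⟨Or.inr h, rfl⟩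
    · exact Or.inr (Or.inl ⟨Or.inr h, rfl⟩)
    · exact Or.inr (Or.inr (Or.inl ⟨Or.inr h, rfl⟩))
    · exact Or.inr (Or.inr (Or.inr (Or.inl ⟨Or.inr h, rfl⟩)))
    · exact Or.inr (Or.inr (Or.inr (Or.inr (Or.inl ⟨Or.inr h, rfl⟩))))
    · exact Or.inr (Or.inr (Or.inr (Or.inr (Or.inr (Or.inl ⟨Or.inr h, rfl⟩)))))
    · exact Or.inr (Or.inr (Or.inr (Or.inr (Or.inr (Or.inr ⟨Or.inr h, rfl⟩)))))
  · rintro (⟨h|h,rfl⟩|⟨h|h,rfl⟩|⟨h|h,rfl⟩|⟨h|h,rfl⟩|⟨h|h,rfl⟩|⟨h|h,rfl⟩|⟨h|h,rfl⟩)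
    · exact Or.inl ⟨h, rfl⟩
    · exact Or.inr (Or.inr (Or.inr (Or.inr (Or.inr (Or.inr (Or.inr (Or.inl ⟨h, rfl⟩)))))))
    · exact Or.inr (Or.inl ⟨h, rfl⟩)
    · exact Or.inr (Or.inr (Or.inr (Or.inr (Or.inr (Or.inr (Or.inr (Or.inr (Or.inl ⟨h, rfl⟩))))))))
    · exact Or.inr (Or.inr (Or.inl ⟨h, rfl⟩))
    · exact Or.inr (Or.inr (Or.inr (Or.inr (Or.inr (Or.inr (Or.inr (Or.inr (Or.inr (Or.inl ⟨h, rfl⟩)))))))))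
    · exact Or.inr (Or.inr (Or.inr (Or.inl ⟨h, rfl⟩)))
    · exact Or.inr (Or.inr (Or.inr (Or.inr (Or.inr (Or.inr (Or.inr (Or.inr (Or.inr (Or.inr (Or.inl ⟨h, rfl⟩))))))))))
    · exact Or.inr (Or.inr (Or.inr (Or.inr (Or.inl ⟨h, rfl⟩))))
    · exact Or.inr (Or.inr (Or.inr (Or.inr (Or.inr (Or.inr (Or.inr (Or.inr (Or.inr (Or.inr (Or.inr (Or.inl ⟨h, rfl⟩)))))))))))
    · exact Or.inr (Or.inr (Or.inr (Or.inr (Or.inr (Or.inl ⟨h, rfl⟩)))))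
    · exact Or.inr (Or.inr (Or.inr (Or.inr (Or.inr (Or.inr (Or.inr (Or.inr (Or.inr (Or.inr (Or.inr (Or.inr (Or.inl ⟨h, rfl⟩))))))))))))
    · exact Or.inr (Or.inr (Or.inr (Or.inr (Or.inr (Or.inr (Or.inl ⟨h, rfl⟩))))))
    · exact Or.inr (Or.inr (Or.inr (Or.inr (Or.inr (Or.inr (Or.inr (Or.inr (Or.inr (Or.inr (Or.inr (Or.inr (Or.inr ⟨h, rfl⟩))))))))))))

theorem pv_extract_eq (user_message : String) :
    extract_selected_days_py user_message = extract_selected_days_py_alt user_message := by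
  simp only [extract_selected_days_py, extract_selected_days_py_alt]
  rw [PySem.List.foldl_append_if
    (p := fun p : Int × List String =>
      p.2.any (fun n => PySem.Str.isIn n (PySem.Str.lower (PySem.Str.strip user_message))))
    (f := fun p : Int × List String => p.1)]
  rw [List.nil_append]
  set u := PySem.Str.lower (PySem.Str.strip user_message) with hu
  set res : List Int := ((PySem.List.enumerate pvDaySynonyms).filter
      (fun p : Int × List String => p.2.any (fun n => PySem.Str.isIn n u))).map
      (fun p => p.1) with hres
  set sel : List Int :=
    pvDayPairs.foldl
      (fun acc p =>
        if PySem.Str.isIn p.1 u then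
          if acc.contains p.2 then acc else acc ++ [p.2]
        else acc) [] with hsel
  have hresPW : res.Pairwise (fun a b : Int => a < b) := by
    rw [hres, List.pairwise_map]
    exact (PySem.List.pairwise_lt_enumerate pvDaySynonyms 0).filter _
  have hresND : res.Nodup := hresPW.imp (fun {a b} h => ne_of_lt h)
  have hselND : sel.Nodup := pv_foldA_nodup u pvDayPairs [] List.nodup_nil
  have hmem : ∀ x : Int, x ∈ sel ↔ x ∈ res := by
    intro x
    rw [hsel, pv_foldA_mem]
    simp only [List.not_mem_nil, false_or]
    exact pv_mem_iff u x
  have hperm : res.Perm sel :=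
    (List.perm_ext_iff_of_nodup hresND hselND).mpr (fun x => (hmem x).symm)
  have hsorted : PySem.List.sorted sel (fun x => x) false = res :=
    PySem.List.sorted_eq_of_perm_of_pairwise_lt _ _ _ hperm hresPW
  have hnil : sel = [] ↔ res = [] := by
    constructor <;> intro hn
    · exact List.eq_nil_of_length_eq_zero (hperm.length_eq.trans (by simp [hn]))
    · exact List.eq_nil_of_length_eq_zero ((hperm.length_eq.symm).trans (by simp [hn]))
  by_cases h : sel = []
  · rw [if_neg (by simp [h]), if_neg (by simp [hnil.mp h])]
  · rw [if_pos h, if_pos (fun hc => h (hnil.mpr hc)), hsorted]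

-- ===== VERDICT (by name: the statement is the Claim_ definition above) =====
theorem extract_selected_days_py_spec : Claim_equal_extract_selected_days_py := by
  intro user_message _
  unfold Spec_extract_selected_days_py
  exact pv_extract_eq user_message
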